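-- pv_equiv track=rewrite | github.com/Irlet/Python_SelfTraining | Fun_with_numbers.py | get_even_numbers
-- ===== SOURCE A (Python) =====
-- def get_even_numbers(x, stop, z):
--     """Returns a list containing first 'x' even elements lower than 'stop'.
--        Those elements must be divisible by 'z' """
--
--     result = []
--     number = stop - 1
--     while len(result) < x:
--         if number % z == 0 and number % 2 == 0:
--             result.append(number)
--         number -= 1
--     return result
-- ===== SOURCE B (Python) =====
-- def get_even_numbers(x, stop, z):
--     """Returns a list containing first 'x' even elements lower than 'stop'.
--        Those elements must be divisible by 'z' """
--
--     if x <= 0: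
--         return []
--     step = abs(z) if z % 2 == 0 else 2 * abs(z)
--     first = ((stop - 1) // step) * step
--     return [first - i * step for i in range(x)]
-- ===== Notes on version B (the rewrite author's own statement) =====
-- stated objective: faster
-- what changed: Replaces the one-by-one countdown scan testing every integer below stop with a closed form: compute step = lcm(z,2), take the largest multiple of step that is <= stop-1, and emit the x-term arithmetic progression directly.
import Mathlib
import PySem

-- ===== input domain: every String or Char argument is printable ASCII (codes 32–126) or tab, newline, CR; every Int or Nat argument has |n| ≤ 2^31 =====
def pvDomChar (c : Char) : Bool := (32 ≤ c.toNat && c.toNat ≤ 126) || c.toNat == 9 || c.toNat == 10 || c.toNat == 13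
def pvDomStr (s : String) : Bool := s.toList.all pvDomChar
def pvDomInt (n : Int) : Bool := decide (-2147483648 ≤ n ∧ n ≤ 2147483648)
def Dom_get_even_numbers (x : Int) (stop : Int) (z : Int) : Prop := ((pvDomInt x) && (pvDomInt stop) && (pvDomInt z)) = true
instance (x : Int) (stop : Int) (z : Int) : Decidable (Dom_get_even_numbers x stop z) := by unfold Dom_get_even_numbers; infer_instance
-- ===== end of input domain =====

-- B replaces A's one-by-one countdown scan by a closed form (largest multiple of lcm(z,2)
-- at or below stop-1, then the x-term arithmetic progression); objective: faster.

-- ===== PORT A =====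
-- A's while loop, step for step; the Nat argument is a fuel guard only (proved sufficient
-- below): every iteration performs exactly A's test and append on the same state.
def loopA (x z : Int) : Nat → Int → List Int → List Int
  | 0, _, result => result
  | fuel+1, number, result =>
    if (result.length : Int) < x then
      loopA x z fuel (number - 1)
        (if PySem.Int.mod number z = 0 ∧ PySem.Int.mod number 2 = 0 then result ++ [number]
         else result)
    else result

def get_even_numbers (x : Int) (stop : Int) (z : Int) : List Int :=
  loopA x z ((x.toNat + 1) * (2 * z.natAbs)) (stop - 1) []

-- ===== PORT B =====
def get_even_numbers_alt (x : Int) (stop : Int) (z : Int) : List Int :=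
  if x ≤ 0 then []
  else
    let step : Int := if PySem.Int.mod z 2 = 0 then |z| else 2 * |z|
    let first : Int := (PySem.Int.floordiv (stop - 1) step) * step
    (PySem.List.pyRange 0 x 1).map (fun i => first - i * step)

-- ===== PRECONDITION & SPEC =====
-- Pre_ excludes exactly the inputs where the Python A raises ZeroDivisionError: z = 0 with x > 0.
def Pre_get_even_numbers (x : Int) (stop : Int) (z : Int) : Prop := x ≤ 0 ∨ z ≠ 0
instance (x : Int) (stop : Int) (z : Int) : Decidable (Pre_get_even_numbers x stop z) := by
  unfold Pre_get_even_numbers; infer_instance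

def pvWitness_get_even_numbers : Int × Int × Int := (3, 20, 3)

def Spec_get_even_numbers (x : Int) (stop : Int) (z : Int) (out : List Int) : Prop := out = get_even_numbers_alt x stop z
instance (x : Int) (stop : Int) (z : Int) (out : List Int) : Decidable (Spec_get_even_numbers x stop z out) := by unfold Spec_get_even_numbers; infer_instance

-- ===== CLAIM (what is proved, stated in full; the proofs are below) =====
def Claim_equal_get_even_numbers : Prop := ∀ (x : Int) (stop : Int) (z : Int), Dom_get_even_numbers x stop z → Pre_get_even_numbers x stop z → Spec_get_even_numbers x stop z (get_even_numbers x stop z)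

-- ===== LEMMAS AND PROOFS =====

-- B's step value as a standalone function of z (proof bookkeeping only).
def stepOf (z : Int) : Int := if PySem.Int.mod z 2 = 0 then |z| else 2 * |z|

-- The descending arithmetic progression h, h-L, …, h-(k-1)L.
def descMults (L : Int) : Int → Nat → List Int
  | _, 0 => []
  | h, k+1 => h :: descMults L (h - L) k

lemma stepOf_pos (z : Int) (hz : z ≠ 0) : 0 < stepOf z := by
  unfold stepOf
  have := abs_pos.mpr hz
  split_ifs <;> omega

lemma stepOf_le (z : Int) : stepOf z ≤ 2 * |z| := by
  unfold stepOf
  have := abs_nonneg z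
  split_ifs <;> omega

-- A's loop test fires exactly on the multiples of B's step.
lemma hit_iff (z : Int) (n : Int) :
    (PySem.Int.mod n z = 0 ∧ PySem.Int.mod n 2 = 0) ↔ stepOf z ∣ n := by
  unfold stepOf
  rw [PySem.Int.mod_eq_zero_iff_dvd, PySem.Int.mod_eq_zero_iff_dvd]
  split_ifs with h2
  all_goals rw [PySem.Int.mod_eq_zero_iff_dvd] at h2
  · constructor
    · rintro ⟨h1, _⟩; exact (abs_dvd z n).mpr h1
    · intro h; exact ⟨(abs_dvd z n).mp h, h2.trans ((abs_dvd z n).mp h)⟩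
  · constructor
    · rintro ⟨h1, h2n⟩
      obtain ⟨a, ha⟩ := h1
      have haeven : 2 ∣ a := by
        by_contra hao
        obtain ⟨e, he⟩ : ∃ e, z = 2 * e + 1 := ⟨z / 2, by omega⟩
        obtain ⟨c, hc⟩ : ∃ c, a = 2 * c + 1 := ⟨a / 2, by omega⟩
        have hodd : n = 2 * (2 * e * c + e + c) + 1 := by rw [ha, he, hc]; ring
        obtain ⟨d, hd⟩ := h2n
        omega
      obtain ⟨c, hc⟩ := haeven
      rcases abs_cases z with ⟨h, _⟩ | ⟨h, _⟩
      · exact ⟨c, by rw [ha, hc, h]; ring⟩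
      · exact ⟨-c, by rw [ha, hc, h]; ring⟩
    · intro h
      have hz1 : z ∣ 2 * |z| := Dvd.dvd.mul_left ((dvd_abs z z).mpr dvd_rfl) 2
      exact ⟨hz1.trans h, (dvd_mul_right 2 |z|).trans h⟩

-- Stepping n down by one, against a positive modulus L.
lemma ediv_emod_of_eq (L q r m : Int) (hL : 0 < L) (h0 : 0 ≤ r) (hlt : r < L) (hm : m = r + L * q) :
    m / L = q ∧ m % L = r := by
  subst hm
  constructor
  · rw [Int.add_mul_ediv_left _ _ (by omega : L ≠ 0), Int.ediv_eq_zero_of_lt h0 hlt, Int.zero_add]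
  · rw [Int.add_mul_emod_self_left, Int.emod_eq_of_lt h0 hlt]

lemma step_dvd (L n : Int) (hL : 0 < L) (hd : L ∣ n) :
    (n - 1) / L = n / L - 1 ∧ (n - 1) % L = L - 1 := by
  have hmul : L * (n / L) = n := Int.mul_ediv_cancel' hd
  exact ediv_emod_of_eq L (n / L - 1) (L - 1) (n - 1) hL (by omega) (by omega)
    (by rw [mul_sub, mul_one]; omega)

lemma step_not_dvd (L n : Int) (hL : 0 < L) (hd : ¬ L ∣ n) :
    (n - 1) / L = n / L ∧ (n - 1) % L = n % L - 1 := by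
  have hadd : n % L + L * (n / L) = n := Int.emod_add_mul_ediv n L
  have h0 : 0 ≤ n % L := Int.emod_nonneg n (by omega)
  have hlt : n % L < L := Int.emod_lt_of_pos n hL
  have hne : n % L ≠ 0 := fun h => hd (Int.dvd_of_emod_eq_zero h)
  exact ediv_emod_of_eq L (n / L) (n % L - 1) (n - 1) hL (by omega) (by omega) (by omega)

-- Main invariant: with enough fuel, A's loop appends the descending progression of the
-- next (x - |acc|) multiples of stepOf z at or below n.
lemma loopA_eq (x z : Int) (hz : z ≠ 0) :
    ∀ (fuel : Nat) (n : Int) (acc : List Int),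
      (x - acc.length).toNat * (stepOf z).toNat + (n % stepOf z).toNat ≤ fuel →
      loopA x z fuel n acc
        = acc ++ descMults (stepOf z) (stepOf z * (n / stepOf z)) (x - acc.length).toNat := by
  have hL : 0 < stepOf z := stepOf_pos z hz
  intro fuel
  induction fuel with
  | zero =>
    intro n acc h
    have hk : (x - acc.length).toNat = 0 := by
      rcases Nat.eq_zero_or_pos (x - acc.length).toNat with h0 | hpos
      · exact h0
      · have := Nat.le_mul_of_pos_left (stepOf z).toNat hpos
        omega
    rw [hk]
    simp [loopA, descMults]
  | succ f ih =>
    intro n acc h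
    by_cases hx : (acc.length : Int) < x
    · have hk : (x - acc.length).toNat = (x - acc.length - 1).toNat + 1 := by omega
      by_cases hd : stepOf z ∣ n
      · have hcond : PySem.Int.mod n z = 0 ∧ PySem.Int.mod n 2 = 0 := (hit_iff z n).mpr hd
        have hmul : stepOf z * (n / stepOf z) = n := Int.mul_ediv_cancel' hd
        obtain ⟨hdiv1, hmod1⟩ := step_dvd (stepOf z) n hL hd
        have hmod0 : n % stepOf z = 0 := Int.emod_eq_zero_of_dvd hd
        have hlen : ((acc ++ [n]).length : Int) = (acc.length : Int) + 1 := by simp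
        have hk2 : (x - ((acc ++ [n]).length : Int)).toNat = (x - acc.length - 1).toNat := by
          rw [hlen]; congr 1; ring
        simp only [loopA, if_pos hx, if_pos hcond]
        rw [ih (n - 1) (acc ++ [n]) ?_]
        · rw [hk, hk2, hdiv1, mul_sub, mul_one, hmul]
          simp [descMults, List.append_assoc]
        · rw [hk2, hmod1]
          rw [hk, hmod0] at h
          have hdist : ((x - acc.length - 1).toNat + 1) * (stepOf z).toNat
              = (x - acc.length - 1).toNat * (stepOf z).toNat + (stepOf z).toNat := by ring
          rw [hdist] at h
          omega
      · have hcond : ¬ (PySem.Int.mod n z = 0 ∧ PySem.Int.mod n 2 = 0) :=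
          fun hc => hd ((hit_iff z n).mp hc)
        obtain ⟨hdiv1, hmod1⟩ := step_not_dvd (stepOf z) n hL hd
        have hne : n % stepOf z ≠ 0 := fun h0 => hd (Int.dvd_of_emod_eq_zero h0)
        have h0 : 0 ≤ n % stepOf z := Int.emod_nonneg n (by omega)
        simp only [loopA, if_pos hx, if_neg hcond]
        rw [ih (n - 1) acc ?_]
        · rw [hdiv1]
        · rw [hmod1]; omega
    · have hk : (x - acc.length).toNat = 0 := by omega
      rw [hk]
      simp [loopA, if_neg hx, descMults]

lemma loopA_nil_of_nonpos (x z : Int) (hx : x ≤ 0) :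
    ∀ (fuel : Nat) (n : Int), loopA x z fuel n [] = [] := by
  intro fuel
  cases fuel with
  | zero => intro n; rfl
  | succ f =>
    intro n
    have hcond : ¬ ((([] : List Int).length : Int) < x) := by simp; omega
    simp only [loopA, if_neg hcond]

-- B's comprehension is exactly the descending progression.
lemma range_map_eq_descMults (L : Int) :
    ∀ (k : Nat) (first : Int),
      (List.range k).map (fun i : Nat => first - (i : Int) * L) = descMults L first k := by
  intro k
  induction k with
  | zero => intro first; simp [descMults]
  | succ k ih =>
    intro first
    rw [List.range_succ_eq_map, List.map_cons, List.map_map, descMults]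
    congr 1
    · simp
    · rw [← ih (first - L)]
      apply List.map_congr_left
      intro i _
      simp only [Function.comp_apply]
      push_cast
      ring

-- ===== VERDICT (by name: the statement is the Claim_ definition above) =====
theorem get_even_numbers_spec : Claim_equal_get_even_numbers := by
  intro x stop z hdom hpre
  unfold Spec_get_even_numbers
  by_cases hx : x ≤ 0
  · rw [get_even_numbers, loopA_nil_of_nonpos x z hx]
    unfold get_even_numbers_alt
    rw [if_pos hx]
  · have hz : z ≠ 0 := hpre.resolve_left hx
    have hL : 0 < stepOf z := stepOf_pos z hz
    have hbound : x.toNat * (stepOf z).toNat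
        + ((stop - 1) % stepOf z).toNat ≤ (x.toNat + 1) * (2 * z.natAbs) := by
      have h1 : (stepOf z).toNat ≤ 2 * z.natAbs := by
        have h := stepOf_le z
        have habs : |z| = (z.natAbs : Int) := Int.abs_eq_natAbs z
        omega
      have h2 : ((stop - 1) % stepOf z).toNat < (stepOf z).toNat := by
        have hlt := Int.emod_lt_of_pos (stop - 1) hL
        have hnn := Int.emod_nonneg (stop - 1) (by omega : stepOf z ≠ 0)
        omega
      have h4 : x.toNat * (stepOf z).toNat ≤ x.toNat * (2 * z.natAbs) :=
        Nat.mul_le_mul_left _ h1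
      have h5 : (x.toNat + 1) * (2 * z.natAbs) = x.toNat * (2 * z.natAbs) + 2 * z.natAbs := by
        ring
      omega
    rw [get_even_numbers, loopA_eq x z hz _ (stop - 1) [] (by simpa using hbound)]
    unfold get_even_numbers_alt
    rw [if_neg hx]
    show [] ++ descMults (stepOf z) (stepOf z * ((stop - 1) / stepOf z))
          (x - (([] : List Int).length : Int)).toNat
        = (PySem.List.pyRange 0 x 1).map
            (fun i => (PySem.Int.floordiv (stop - 1) (stepOf z)) * stepOf z - i * stepOf z)
    rw [PySem.Int.floordiv_eq_ediv_of_pos hL, PySem.List.pyRange_one]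
    rw [List.map_map]
    have hmapeq : (List.range (x - 0).toNat).map
          ((fun i => (stop - 1) / stepOf z * stepOf z - i * stepOf z) ∘ (fun k : Nat => 0 + (k : Int)))
        = (List.range (x - 0).toNat).map
          (fun i : Nat => (stop - 1) / stepOf z * stepOf z - (i : Int) * stepOf z) := by
      apply List.map_congr_left
      intro i _
      simp
    rw [hmapeq, range_map_eq_descMults]
    simp only [List.length_nil, Int.natCast_zero, sub_zero, List.nil_append]
    rw [mul_comm ((stop - 1) / stepOf z) (stepOf z)]
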